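-- pv_equiv track=rewrite | github.com/Kknopik/kryptografia | zad_3_1_9.py | CommonDivisors
-- ===== SOURCE A (Python) =====
-- from collections import Counter
--
-- def CommonDivisors(distances):
--     divisors = []
--     for num in distances:
--         for i in range(2, 17):
--             if num % i == 0:
--                 divisors.append(i)
--     common = dict(Counter(divisors).most_common())
--     biggest = max(common.values())
--
--     common_divisors = []
--     for key, val in common.items():
--         if val == biggest:
--             common_divisors.append(key)
--     common_divisors.sort()
--
--     return common_divisors
-- ===== SOURCE B (Python) =====
-- from collections import Counter
--
-- def CommonDivisors(distances):
--     # Aggregate duplicate numbers once, then one online argmax pass over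
--     # candidates 2..16: no divisor table, no most_common, no final sort.
--     freq = Counter(distances)
--     best = 0
--     winners = []
--     for i in range(2, 17):
--         c = sum(m for v, m in freq.items() if v % i == 0)
--         if c > best:
--             best = c
--             winners = [i]
--         elif c == best and best > 0:
--             winners.append(i)
--     return winners
-- ===== Notes on version B (the rewrite author's own statement) =====
-- stated objective: alternative
-- what changed: B first collapses the input into a Counter keyed by the numbers themselves (each distinct value weighted by its multiplicity) and then makes a single online-argmax pass over the candidates 2..16 that maintains the best count and its winner list incrementally, instead of A's flat divisor list tallied by Counter.most_common, a separate max() pass, a selection pass and a final sort.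
import Mathlib
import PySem

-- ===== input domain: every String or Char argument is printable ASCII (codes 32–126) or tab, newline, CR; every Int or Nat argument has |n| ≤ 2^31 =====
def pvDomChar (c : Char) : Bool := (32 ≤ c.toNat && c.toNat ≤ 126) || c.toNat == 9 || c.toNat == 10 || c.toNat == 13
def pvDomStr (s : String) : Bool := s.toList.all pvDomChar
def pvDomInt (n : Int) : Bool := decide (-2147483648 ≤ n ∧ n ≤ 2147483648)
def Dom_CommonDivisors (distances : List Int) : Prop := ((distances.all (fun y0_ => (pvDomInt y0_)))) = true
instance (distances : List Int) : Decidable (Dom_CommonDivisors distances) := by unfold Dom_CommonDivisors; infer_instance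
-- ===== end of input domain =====

-- B aggregates duplicate inputs in a Counter keyed by the numbers themselves and then makes a
-- single online-argmax pass over the candidates 2..16, instead of building a flat divisor list,
-- tallying it with Counter.most_common, taking max() and sorting the selected keys.

-- ===== PORT A =====
def CommonDivisors (distances : List Int) : List Int :=
  let divisors : List Int := distances.foldl (fun divisors num =>
    (PySem.List.pyRange 2 17 1).foldl (fun divisors i =>
      if PySem.Int.mod num i == 0 then divisors ++ [i] else divisors) divisors) []
  let common : PySem.Dict Int Int :=
    PySem.Dict.ofList (PySem.List.sorted (PySem.Dict.counter divisors).items (fun p => p.2) true)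
  match PySem.List.max? common.values (fun v => v) with
  | none => []   -- Python: max([]) raises ValueError here; excluded by Pre_
  | some biggest =>
    let common_divisors : List Int := common.items.foldl
      (fun acc kv => if kv.2 == biggest then acc ++ [kv.1] else acc) []
    PySem.List.sorted common_divisors (fun x => x)

-- ===== PORT B =====
def CommonDivisors_alt (distances : List Int) : List Int :=
  let freq : PySem.Dict Int Int := PySem.Dict.counter distances
  let st : Int × List Int := (PySem.List.pyRange 2 17 1).foldl (fun (st : Int × List Int) i =>
    -- c = sum(m for v, m in freq.items() if v % i == 0)
    let c : Int := ((freq.items.filter (fun vm => PySem.Int.mod vm.1 i == 0)).map (fun vm => vm.2)).sum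
    if st.1 < c then (c, [i])
    else if c == st.1 ∧ 0 < st.1 then (st.1, st.2 ++ [i])
    else st) (0, [])
  st.2

-- ===== PRECONDITION & SPEC =====
-- Pre_ excludes exactly the inputs where no number has a divisor in 2..16 (in particular []),
-- on which A's max() of an empty collection raises ValueError (B returns [] there).
def Pre_CommonDivisors (distances : List Int) : Prop :=
  ∃ num ∈ distances, ∃ i ∈ PySem.List.pyRange 2 17 1, PySem.Int.mod num i = 0
instance (distances : List Int) : Decidable (Pre_CommonDivisors distances) := by
  unfold Pre_CommonDivisors; infer_instance
def pvWitness_CommonDivisors : List Int := [6, 4]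

def Spec_CommonDivisors (distances : List Int) (out : List Int) : Prop := out = CommonDivisors_alt distances
instance (distances : List Int) (out : List Int) : Decidable (Spec_CommonDivisors distances out) := by unfold Spec_CommonDivisors; infer_instance

-- ===== CLAIM (what is proved, stated in full; the proofs are below) =====
def Claim_equal_CommonDivisors : Prop := ∀ (distances : List Int), Dom_CommonDivisors distances → Pre_CommonDivisors distances → Spec_CommonDivisors distances (CommonDivisors distances)

-- ===== LEMMAS AND PROOFS =====

-- proof-side abbreviations
def pvRng : List Int := PySem.List.pyRange 2 17 1
def pvCnt (distances : List Int) (i : Int) : Int :=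
  (distances.countP (fun num => PySem.Int.mod num i == 0) : Int)
def pvDivs (distances : List Int) : List Int :=
  distances.flatMap (fun num => pvRng.filter (fun i => PySem.Int.mod num i == 0))
def pvCountsB (distances : List Int) : List (Int × Int) :=
  (pvRng.filter (fun i => pvCnt distances i != 0)).map (fun i => (i, pvCnt distances i))
-- A's "select keys of maximal count" result, written over pvCountsB
def pvSelect (distances : List Int) : List Int :=
  match PySem.List.max? ((pvCountsB distances).map (fun p => p.2)) (fun v => v) with
  | none => []
  | some b => ((pvCountsB distances).filter (fun p => p.2 == b)).map (fun p => p.1)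
-- B's running maximum over the candidate range
def pvM (distances : List Int) : Int :=
  pvRng.foldl (fun m i => max m (pvCnt distances i)) 0

theorem pvRng_nodup : pvRng.Nodup := by decide
theorem pvRng_sorted : pvRng.Pairwise (· < ·) := by decide

theorem pv_divs_eq (distances : List Int) :
    distances.foldl (fun divisors num =>
      (PySem.List.pyRange 2 17 1).foldl (fun divisors i =>
        if PySem.Int.mod num i == 0 then divisors ++ [i] else divisors) divisors) [] =
    pvDivs distances := by
  have h : ∀ (num : Int) (acc : List Int),
      (PySem.List.pyRange 2 17 1).foldl (fun divisors i =>
        if PySem.Int.mod num i == 0 then divisors ++ [i] else divisors) acc =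
      acc ++ pvRng.filter (fun i => PySem.Int.mod num i == 0) := by
    intro num acc
    simpa using PySem.List.foldl_append_if
      (fun i => PySem.Int.mod num i == 0) (fun i => i) pvRng acc
  simp only [h]
  simpa [pvDivs] using PySem.List.foldl_append_eq_flatMap
    (fun num => pvRng.filter (fun i => PySem.Int.mod num i == 0)) distances []

theorem pv_count_divs (distances : List Int) (k : Int) (hk : k ∈ pvRng) :
    ((pvDivs distances).count k : Int) = pvCnt distances k := by
  unfold pvDivs pvCnt
  induction distances with
  | nil => simp
  | cons num t ih =>
    have hcf : (pvRng.filter (fun i => PySem.Int.mod num i == 0)).count k =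
        if (PySem.Int.mod num k == 0) = true then 1 else 0 := by
      by_cases h : (PySem.Int.mod num k == 0) = true
      · rw [if_pos h, List.count_filter (p := fun i => PySem.Int.mod num i == 0) (a := k) h,
          List.count_eq_one_of_mem pvRng_nodup hk]
      · rw [if_neg h, List.count_eq_zero]
        intro hmem
        exact h (List.mem_filter.mp hmem).2
    rw [List.flatMap_cons, List.count_append, List.countP_cons, hcf]
    by_cases h : (PySem.Int.mod num k == 0) = true <;> simp only [h, if_true] <;>
      push_cast <;> omega

theorem pv_cnt_pos_iff (distances : List Int) (k : Int) :
    pvCnt distances k ≠ 0 ↔ ∃ num ∈ distances, PySem.Int.mod num k = 0 := by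
  unfold pvCnt
  constructor
  · intro h
    have hpos : 0 < distances.countP (fun num => PySem.Int.mod num k == 0) :=
      Nat.pos_of_ne_zero (by exact_mod_cast h)
    obtain ⟨num, hnum, hp⟩ := List.countP_pos_iff.mp hpos
    exact ⟨num, hnum, by simpa using hp⟩
  · rintro ⟨num, hnum, hp⟩
    have hpos : 0 < distances.countP (fun num => PySem.Int.mod num k == 0) :=
      List.countP_pos_iff.mpr ⟨num, hnum, by simpa using hp⟩
    exact_mod_cast Nat.pos_iff_ne_zero.mp hpos

theorem pv_mem_divs (distances : List Int) (k : Int) :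
    k ∈ pvDivs distances ↔ (k ∈ pvRng ∧ pvCnt distances k ≠ 0) := by
  rw [pv_cnt_pos_iff]
  unfold pvDivs
  simp only [List.mem_flatMap, List.mem_filter]
  constructor
  · rintro ⟨num, hnum, hkr, hmod⟩
    exact ⟨hkr, num, hnum, by simpa using hmod⟩
  · rintro ⟨hkr, num, hnum, hmod⟩
    exact ⟨num, hnum, hkr, by simpa using hmod⟩

theorem pv_items_perm (distances : List Int) :
    (PySem.Dict.counter (pvDivs distances)).items.Perm (pvCountsB distances) := by
  rw [PySem.Dict.items_counter]
  have hkeys : (PySem.Set.ofList (pvDivs distances)).Perm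
      (pvRng.filter (fun i => pvCnt distances i != 0)) := by
    rw [List.perm_ext_iff_of_nodup (PySem.Set.nodup_ofList _) (pvRng_nodup.filter _)]
    intro a
    rw [PySem.Set.mem_ofList, pv_mem_divs, List.mem_filter]
    simp
  have hmap : (PySem.Set.ofList (pvDivs distances)).map
        (fun k => (k, ((pvDivs distances).count k : Int))) =
      (PySem.Set.ofList (pvDivs distances)).map (fun k => (k, pvCnt distances k)) := by
    apply List.map_congr_left
    intro k hkmem
    have hk : k ∈ pvRng := by
      have := (pv_mem_divs distances k).mp ((PySem.Set.mem_ofList _ _).mp hkmem)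
      exact this.1
    rw [pv_count_divs distances k hk]
  rw [hmap]
  unfold pvCountsB
  exact hkeys.map _

theorem pv_countsB_keys (distances : List Int) :
    (pvCountsB distances).map Prod.fst = pvRng.filter (fun i => pvCnt distances i != 0) := by
  unfold pvCountsB
  rw [List.map_map]
  simp [Function.comp_def]

theorem pv_max_eq_of_perm (l l' : List Int) (h : l.Perm l') (m m' : Int)
    (hm : PySem.List.max? l (fun v => v) = some m)
    (hm' : PySem.List.max? l' (fun v => v) = some m') : m = m' := by
  have h1 := PySem.List.max?_isMax hm (m := m)
  have h2 := PySem.List.max?_isMax hm' (m := m')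
  have hmem : m ∈ l' := h.mem_iff.mp (PySem.List.max?_mem hm)
  have hmem' : m' ∈ l := h.mem_iff.mpr (PySem.List.max?_mem hm')
  exact le_antisymm (h2 m hmem) (h1 m' hmem')

-- the sorted Counter items have nodup keys, so dict() of them is exactly that pair list
theorem pv_dict_items (S : List (Int × Int)) (hnd : (S.map Prod.fst).Nodup) :
    (PySem.Dict.ofList S).items = S := by
  unfold PySem.Dict.ofList PySem.Dict.update
  have := PySem.Dict.items_foldl_insert_fresh S Prod.fst Prod.snd PySem.Dict.empty
    (fun a _ => PySem.Dict.contains_empty a.1) hnd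
  simpa using this

-- A equals the "select keys of maximal count" abstraction
theorem pv_A_eq_select (distances : List Int)
    (hpre : Pre_CommonDivisors distances) :
    CommonDivisors distances = pvSelect distances := by
  obtain ⟨num0, hnum0, i0, hi0, hmod0⟩ := hpre
  have hdiv_mem : i0 ∈ pvDivs distances := by
    rw [pv_mem_divs, pv_cnt_pos_iff]
    exact ⟨hi0, num0, hnum0, hmod0⟩
  set S : List (Int × Int) :=
    PySem.List.sorted (PySem.Dict.counter (pvDivs distances)).items (fun p => p.2) true with hS
  have hSperm : S.Perm (pvCountsB distances) :=
    (PySem.List.sorted_perm _ _ _).trans (pv_items_perm distances)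
  have hBkeys_nodup : ((pvCountsB distances).map Prod.fst).Nodup := by
    rw [pv_countsB_keys]
    exact pvRng_nodup.filter _
  have hSkeys : (S.map Prod.fst).Nodup := (hSperm.map Prod.fst).nodup_iff.mpr hBkeys_nodup
  have hSne : S ≠ [] := by
    rw [hS, Ne, PySem.List.sorted_eq_nil_iff]
    intro h
    have h2 := pv_items_perm distances
    rw [h] at h2
    have hB : pvCountsB distances = [] := h2.symm.eq_nil
    have hmem : i0 ∈ (pvCountsB distances).map Prod.fst := by
      rw [pv_countsB_keys, List.mem_filter]
      have hmd := (pv_mem_divs distances i0).mp hdiv_mem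
      exact ⟨hmd.1, by simpa using hmd.2⟩
    rw [hB] at hmem
    simp at hmem
  have hBne : pvCountsB distances ≠ [] := by
    intro h
    rw [h] at hSperm
    exact hSne hSperm.eq_nil
  simp only [CommonDivisors, pvSelect, pv_divs_eq, ← hS]
  have hvals : (PySem.Dict.ofList S).values = S.map (fun p => p.2) := by
    simp [PySem.Dict.values, pv_dict_items S hSkeys]
  rw [pv_dict_items S hSkeys, hvals]
  have hmapAne : S.map (fun p => p.2) ≠ [] := by simpa using hSne
  have hmapBne : (pvCountsB distances).map (fun p => p.2) ≠ [] := by simpa using hBne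
  cases hmA : PySem.List.max? (S.map (fun p => p.2)) (fun v => v) with
  | none => exact absurd ((PySem.List.max?_eq_none_iff _ _).mp hmA) hmapAne
  | some bA =>
  cases hmB : PySem.List.max? ((pvCountsB distances).map (fun p => p.2)) (fun v => v) with
  | none => exact absurd ((PySem.List.max?_eq_none_iff _ _).mp hmB) hmapBne
  | some bB =>
  have hbAB : bA = bB :=
    pv_max_eq_of_perm _ _ (hSperm.map (fun p => p.2)) _ _ hmA hmB
  subst hbAB
  dsimp only
  rw [PySem.List.foldl_append_if (fun kv => kv.2 == bA) (fun kv => kv.1) S []]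
  simp only [List.nil_append]
  apply PySem.List.sorted_eq_of_perm_of_pairwise_lt _ _ (fun v => v)
  · exact (((hSperm.filter (fun p => p.2 == bA)).map (fun p => p.1))).symm
  · refine List.pairwise_map.mpr ?_
    refine List.Pairwise.filter _ ?_
    unfold pvCountsB
    refine List.pairwise_map.mpr ?_
    exact (pvRng_sorted.filter _).imp (fun h => h)

-- ---- B-side lemmas ----

-- the per-candidate sum over Counter items equals the plain count
theorem pv_sum_counter (l : List Int) (p : Int → Bool) :
    ((((PySem.Dict.counter l).items.filter (fun vm => p vm.1)).map (fun vm => vm.2)).sum : Int)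
      = (l.countP p : Int) := by
  rw [PySem.Dict.items_counter]
  rw [List.filter_map, List.map_map]
  have hq : (fun vm => p vm.1) ∘ (fun k => (k, ((l.count k : Nat) : Int))) = fun k => p k := rfl
  rw [hq]
  have hg : (fun vm => vm.2) ∘ (fun k => (k, ((l.count k : Nat) : Int)))
      = fun k => ((l.count k : Nat) : Int) := rfl
  rw [hg]
  set S : List Int := PySem.Set.ofList l with hSdef
  have hnd : (S.filter (fun k => p k)).Nodup := (PySem.Set.nodup_ofList l).filter _
  have hcast : ((S.filter (fun k => p k)).map (fun k => ((l.count k : Nat) : Int))).sum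
      = (((S.filter (fun k => p k)).map (fun k => l.count k)).sum : Int) := by
    rw [Nat.cast_list_sum, List.map_map]
    rfl
  rw [hcast]
  have hfin : ((S.filter (fun k => p k)).map (fun k => l.count k)).sum
      = (S.filter (fun k => p k)).toFinset.sum (fun k => l.count k) :=
    (List.sum_toFinset _ hnd).symm
  rw [hfin]
  have hTfin : (S.filter (fun k => p k)).toFinset = l.toFinset.filter (fun k => p k) := by
    rw [List.toFinset_filter]
    congr 1
    apply Finset.ext
    intro a
    simp only [List.mem_toFinset, hSdef, PySem.Set.mem_ofList]
  rw [hTfin, Finset.sum_filter]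
  have hterm : ∀ a ∈ l.toFinset, (if p a then l.count a else 0) = (l.filter p).count a := by
    intro a _
    by_cases hpa : p a = true
    · rw [if_pos hpa, List.count_filter hpa]
    · rw [if_neg hpa]
      symm
      rw [List.count_eq_zero]
      intro hmem
      exact hpa (List.mem_filter.mp hmem).2
  rw [Finset.sum_congr rfl hterm]
  have hsub : (l.filter p).toFinset ⊆ l.toFinset := by
    rw [List.toFinset_filter]
    exact Finset.filter_subset _ _
  rw [← Finset.sum_subset hsub (by
    intro a _ ha
    rw [List.count_eq_zero]
    intro hmem
    exact ha (List.mem_toFinset.mpr hmem))]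
  rw [List.sum_toFinset_count_eq_length]
  rw [← List.countP_eq_length_filter]

theorem pv_M_ge (c : Int → Int) (L : List Int) (b : Int) :
    b ≤ L.foldl (fun m i => max m (c i)) b ∧
    ∀ i ∈ L, c i ≤ L.foldl (fun m i => max m (c i)) b := by
  induction L generalizing b with
  | nil => simp
  | cons j t ih =>
    obtain ⟨h1, h2⟩ := ih (max b (c j))
    refine ⟨le_trans (le_max_left _ _) h1, ?_⟩
    intro i hi
    rcases List.mem_cons.mp hi with rfl | hi
    · exact le_trans (le_max_right _ _) h1
    · exact h2 i hi

theorem pv_M_attained (c : Int → Int) (L : List Int) (b : Int) :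
    L.foldl (fun m i => max m (c i)) b = b ∨
    ∃ i ∈ L, c i = L.foldl (fun m i => max m (c i)) b := by
  induction L generalizing b with
  | nil => simp
  | cons j t ih =>
    rcases ih (max b (c j)) with h | ⟨i, hi, hie⟩
    · simp only [List.foldl_cons, h]
      rcases max_cases b (c j) with ⟨he, _⟩ | ⟨he, _⟩
      · exact Or.inl he
      · exact Or.inr ⟨j, List.mem_cons_self, he.symm⟩
    · exact Or.inr ⟨i, List.mem_cons_of_mem _ hi, hie⟩

-- running-argmax fold characterisation
theorem pv_fold_argmax (c : Int → Int) (L : List Int) :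
    ∀ (b : Int) (w : List Int), 0 ≤ b →
    L.foldl (fun (st : Int × List Int) i =>
        if st.1 < c i then (c i, [i])
        else if c i == st.1 ∧ 0 < st.1 then (st.1, st.2 ++ [i])
        else st) (b, w)
    = (L.foldl (fun m i => max m (c i)) b,
       if L.foldl (fun m i => max m (c i)) b = 0 then w
       else (if L.foldl (fun m i => max m (c i)) b = b then w else []) ++
            L.filter (fun i => c i == L.foldl (fun m i => max m (c i)) b)) := by
  induction L with
  | nil => intro b w hb; simp
  | cons j t ih =>
    intro b w hb
    have hMt := pv_M_ge c t (max b (c j))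
    have hM0 : max b (c j) ≤ t.foldl (fun m i => max m (c i)) (max b (c j)) := hMt.1
    simp only [List.foldl_cons]
    by_cases h1 : b < c j
    · rw [if_pos h1]
      rw [ih (c j) [j] (le_of_lt (lt_of_le_of_lt hb h1))]
      have hmax : max b (c j) = c j := max_eq_right (le_of_lt h1)
      simp only [hmax]
      set M := t.foldl (fun m i => max m (c i)) (c j) with hMdef
      have hMcj : c j ≤ M := by rw [hmax] at hM0; exact hM0
      have hMne0 : ¬ (M = 0) := by
        intro h0; rw [h0] at hMcj
        exact absurd (lt_of_le_of_lt hb h1) (not_lt.mpr hMcj)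
      have hMneb : ¬ (M = b) := by
        intro h0
        exact absurd (lt_of_lt_of_le h1 hMcj) (by rw [h0]; exact lt_irrefl b)
      rw [if_neg hMne0, if_neg hMne0, if_neg hMneb, List.filter_cons]
      by_cases hj : (c j == M) = true
      · rw [if_pos hj, if_pos (by simpa using (eq_comm.mp (by simpa using hj)))]
        simp
      · rw [if_neg hj, if_neg (by intro h; exact hj (by simp [h]))]
    · rw [if_neg h1]
      have hcjb : c j ≤ b := le_of_not_gt h1
      have hmax : max b (c j) = b := max_eq_left hcjb
      by_cases h2 : c j = b ∧ 0 < b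
      · rw [if_pos (by exact ⟨by simp [h2.1], h2.2⟩)]
        rw [ih b (w ++ [j]) hb]
        simp only [hmax]
        set M := t.foldl (fun m i => max m (c i)) b with hMdef
        have hbM : b ≤ M := by rw [hmax] at hM0; exact hM0
        have hMne0 : ¬ (M = 0) := by
          intro h0; rw [h0] at hbM; exact absurd h2.2 (not_lt.mpr hbM)
        rw [if_neg hMne0, if_neg hMne0, List.filter_cons]
        by_cases hMb : M = b
        · rw [if_pos hMb, if_pos hMb, if_pos (by simp [h2.1, hMb]), List.append_assoc]
          simp
        · rw [if_neg hMb, if_neg hMb, if_neg (by simp [h2.1]; intro h; exact hMb h.symm)]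
      · rw [if_neg (by intro h; exact h2 ⟨by simpa using h.1, h.2⟩)]
        rw [ih b w hb]
        simp only [hmax]
        set M := t.foldl (fun m i => max m (c i)) b with hMdef
        have hbM : b ≤ M := by rw [hmax] at hM0; exact hM0
        by_cases hM0' : M = 0
        · rw [if_pos hM0', if_pos hM0']
        · rw [if_neg hM0', if_neg hM0', List.filter_cons]
          have hjne : ¬ ((c j == M) = true) := by
            intro h
            have hcjM : c j = M := by simpa using h
            by_cases hMb : M = b
            · exact h2 ⟨hcjM.trans hMb, by omega⟩
            · have : b < M := lt_of_le_of_ne hbM (fun h' => hMb h'.symm)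
              omega
          rw [if_neg hjne]
  

-- B equals "filter the range by the maximal count" when some count is positive
theorem pv_B_eq (distances : List Int) :
    CommonDivisors_alt distances =
      (if pvM distances = 0 then [] else
        pvRng.filter (fun i => pvCnt distances i == pvM distances)) := by
  show ((PySem.List.pyRange 2 17 1).foldl (fun (st : Int × List Int) i =>
      let c : Int := ((((PySem.Dict.counter distances).items.filter
        (fun vm => PySem.Int.mod vm.1 i == 0)).map (fun vm => vm.2)).sum)
      if st.1 < c then (c, [i])
      else if c == st.1 ∧ 0 < st.1 then (st.1, st.2 ++ [i])
      else st) (0, [])).2 = _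
  have hstep : (fun (st : Int × List Int) i =>
      let c : Int := ((((PySem.Dict.counter distances).items.filter
        (fun vm => PySem.Int.mod vm.1 i == 0)).map (fun vm => vm.2)).sum)
      if st.1 < c then (c, [i])
      else if c == st.1 ∧ 0 < st.1 then (st.1, st.2 ++ [i])
      else st)
    = (fun (st : Int × List Int) i =>
      if st.1 < pvCnt distances i then (pvCnt distances i, [i])
      else if pvCnt distances i == st.1 ∧ 0 < st.1 then (st.1, st.2 ++ [i])
      else st) := by
    funext st i
    simp only [pv_sum_counter distances (fun num => PySem.Int.mod num i == 0)]
    rfl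
  rw [hstep]
  rw [pv_fold_argmax (pvCnt distances) (PySem.List.pyRange 2 17 1) 0 [] le_rfl]
  show (if pvM distances = 0 then ([] : List Int)
      else (if pvM distances = 0 then [] else []) ++
        pvRng.filter (fun i => pvCnt distances i == pvM distances)) = _
  by_cases h : pvM distances = 0
  · rw [if_pos h, if_pos h]
  · rw [if_neg h, if_neg h, if_neg h, List.nil_append]

theorem pv_select_eq (distances : List Int)
    (hpre : Pre_CommonDivisors distances) :
    pvSelect distances =
      (if pvM distances = 0 then [] else
        pvRng.filter (fun i => pvCnt distances i == pvM distances)) := by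
  obtain ⟨num0, hnum0, i0, hi0, hmod0⟩ := hpre
  have hc0 : pvCnt distances i0 ≠ 0 :=
    (pv_cnt_pos_iff distances i0).mpr ⟨num0, hnum0, hmod0⟩
  have hcnn : ∀ i, 0 ≤ pvCnt distances i := by
    intro i; unfold pvCnt; positivity
  have hM := pv_M_ge (pvCnt distances) pvRng 0
  have hMc0 : pvCnt distances i0 ≤ pvM distances := hM.2 i0 hi0
  have hMpos : 0 < pvM distances := lt_of_lt_of_le (lt_of_le_of_ne (hcnn i0) (Ne.symm hc0)) hMc0
  have hMne : pvM distances ≠ 0 := ne_of_gt hMpos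
  rw [if_neg hMne]
  have hi0f : i0 ∈ pvRng.filter (fun i => pvCnt distances i != 0) :=
    List.mem_filter.mpr ⟨hi0, by simpa using hc0⟩
  have hVne : ((pvCountsB distances).map (fun p => p.2)) ≠ [] := by
    unfold pvCountsB
    intro h
    rw [List.map_map, List.map_eq_nil_iff] at h
    rw [h] at hi0f
    simp at hi0f
  unfold pvSelect
  cases hmB : PySem.List.max? ((pvCountsB distances).map (fun p => p.2)) (fun v => v) with
  | none => exact absurd ((PySem.List.max?_eq_none_iff _ _).mp hmB) hVne
  | some bB =>
  have hVchar : ∀ v ∈ (pvCountsB distances).map (fun p => p.2),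
      ∃ i ∈ pvRng, pvCnt distances i = v := by
    intro v hv
    unfold pvCountsB at hv
    rw [List.map_map] at hv
    obtain ⟨i, hif, hiv⟩ := List.mem_map.mp hv
    exact ⟨i, (List.mem_filter.mp hif).1, hiv⟩
  have hbBM : bB = pvM distances := by
    obtain ⟨i, hir, hic⟩ := hVchar bB (PySem.List.max?_mem hmB)
    have h1 : bB ≤ pvM distances := hic ▸ hM.2 i hir
    rcases pv_M_attained (pvCnt distances) pvRng 0 with h | ⟨i1, hi1, hie⟩
    · exact absurd (show pvM distances = 0 from h) hMne
    · have hmem : pvM distances ∈ (pvCountsB distances).map (fun p => p.2) := by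
        unfold pvCountsB
        rw [List.map_map]
        refine List.mem_map.mpr ⟨i1, List.mem_filter.mpr ⟨hi1, ?_⟩, hie⟩
        simpa [hie] using hMne
      exact le_antisymm h1 (PySem.List.max?_isMax hmB _ hmem)
  subst hbBM
  show ((pvCountsB distances).filter (fun p => p.2 == pvM distances)).map (fun p => p.1)
      = pvRng.filter (fun i => pvCnt distances i == pvM distances)
  unfold pvCountsB
  rw [List.filter_map, List.map_map]
  have hcomp : ((fun (p : Int × Int) => p.2 == pvM distances) ∘ (fun i => (i, pvCnt distances i)))
      = fun i => pvCnt distances i == pvM distances := rfl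
  rw [hcomp]
  have hid : ((fun (p : Int × Int) => p.1) ∘ (fun i => (i, pvCnt distances i))) = id := rfl
  rw [hid, List.map_id, List.filter_filter]
  apply List.filter_congr
  intro i _
  by_cases h : pvCnt distances i = pvM distances
  · simp [h, hMne]
  · simp [h]

-- ===== VERDICT (by name: the statement is the Claim_ definition above) =====
theorem CommonDivisors_spec : Claim_equal_CommonDivisors := by
  intro distances _ hpre
  unfold Spec_CommonDivisors
  rw [pv_A_eq_select distances hpre, pv_select_eq distances hpre, pv_B_eq distances]
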